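-- pv_equiv track=rewrite | github.com/rangeonnicolas/keywordGraph | keyWordGraph.py | _compute_max_edge_weight_by_word
-- ===== SOURCE A (Python) =====
-- def _compute_max_edge_weight_by_word(edges):
--     max_weight = dict()
--     for couple in edges.keys():
--         word1 = couple[0]
--         word2 = couple[1]
--         if word1 in max_weight.keys():
--             max_weight[word1] = max(max_weight[word1], edges[couple])
--         else:
--             max_weight[word1] = edges[couple]
--         if word2 in max_weight.keys():
--             max_weight[word2] = max(max_weight[word2], edges[couple])
--         else:
--             max_weight[word2] = edges[couple]
--     return(max_weight)
-- ===== SOURCE B (Python) =====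
-- def _compute_max_edge_weight_by_word(edges):
--     collected = {}
--     for (word1, word2), weight in edges.items():
--         collected.setdefault(word1, []).append(weight)
--         collected.setdefault(word2, []).append(weight)
--     return {word: max(weights) for word, weights in collected.items()}
-- ===== Notes on version B (the rewrite author's own statement) =====
-- stated objective: alternative
-- what changed: Replaces A's single pass with per-word initialize-vs-update running-max branches (and a dict lookup edges[couple] per edge) by a two-pass shape: group every edge weight into a per-word list via setdefault, then reduce each list with max in a dict comprehension; the re-lookup of edges[couple] and the membership tests disappear.
import Mathlib
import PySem

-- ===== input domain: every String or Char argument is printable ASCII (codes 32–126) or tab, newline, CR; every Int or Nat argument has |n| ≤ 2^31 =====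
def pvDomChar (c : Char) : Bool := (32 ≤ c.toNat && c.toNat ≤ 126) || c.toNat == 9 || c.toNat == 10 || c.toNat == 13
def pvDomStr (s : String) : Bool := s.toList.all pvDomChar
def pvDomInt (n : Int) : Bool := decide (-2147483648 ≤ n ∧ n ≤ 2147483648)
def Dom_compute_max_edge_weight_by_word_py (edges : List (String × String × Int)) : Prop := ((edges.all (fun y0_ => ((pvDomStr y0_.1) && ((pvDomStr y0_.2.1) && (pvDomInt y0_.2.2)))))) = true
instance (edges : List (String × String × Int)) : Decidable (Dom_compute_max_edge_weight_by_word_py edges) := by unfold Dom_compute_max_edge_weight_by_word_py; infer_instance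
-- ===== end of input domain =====

-- B replaces A's initialize-vs-update running-max branches by a two-pass shape:
-- group all weights per word first, then reduce each group with max, dropping the per-edge edges[couple]
-- re-lookup and the membership branches (objective: alternative decomposition).

-- ===== PORT A =====
-- edges[couple]: first-match association-list lookup (the dict convention); the looked-up key always
-- comes from the list itself, so the `none` case of find? is unreachable (0 is a mere total-function filler).
def pvLookupA (edges : List (String × String × Int)) (w1 w2 : String) : Int :=
  match edges.find? (fun p => p.1 == w1 && p.2.1 == w2) with
  | some p => p.2.2
  | none => 0

-- the body of A's loop: the two initialize-vs-update branches, for word1 then word2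
def pvStepA (edges : List (String × String × Int)) (mw : PySem.Dict String Int)
    (e : String × String × Int) : PySem.Dict String Int :=
  let word1 := e.1
  let word2 := e.2.1
  let w := pvLookupA edges word1 word2
  let mw1 := if mw.contains word1 then mw.insert word1 (max (mw.getD word1 0) w)
             else mw.insert word1 w
  if mw1.contains word2 then mw1.insert word2 (max (mw1.getD word2 0) w)
  else mw1.insert word2 w

def compute_max_edge_weight_by_word_py (edges : List (String × String × Int)) : List (String × Int) :=
  (edges.foldl (pvStepA edges) PySem.Dict.empty).items

-- ===== PORT B =====
-- max(weights) on a nonempty list (Python's max); the [] case is an unreachable total-function filler.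
def pvMaxList : List Int → Int
  | [] => 0
  | h :: t => t.foldl max h

-- the body of B's grouping loop: collected.setdefault(word, []).append(weight) for word1 then word2
def pvStepB (c : PySem.Dict String (List Int)) (e : String × String × Int) :
    PySem.Dict String (List Int) :=
  let c1 := c.insert e.1 (c.getD e.1 [] ++ [e.2.2])
  c1.insert e.2.1 (c1.getD e.2.1 [] ++ [e.2.2])

def compute_max_edge_weight_by_word_py_alt (edges : List (String × String × Int)) : List (String × Int) :=
  let collected := edges.foldl pvStepB PySem.Dict.empty
  collected.items.map (fun p => (p.1, pvMaxList p.2))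

-- ===== PRECONDITION & SPEC =====
-- Pre_ excludes lists whose (word1, word2) couples repeat: such lists are not the image of a
-- Python dict (dict construction collapses duplicate keys before A ever runs), so the
-- association-list reading of A's lookup edges[couple] is ambiguous there.
def Pre_compute_max_edge_weight_by_word_py (edges : List (String × String × Int)) : Prop :=
  (edges.map (fun e => (e.1, e.2.1))).Nodup
instance (edges : List (String × String × Int)) : Decidable (Pre_compute_max_edge_weight_by_word_py edges) := by unfold Pre_compute_max_edge_weight_by_word_py; infer_instance

def pvWitness_compute_max_edge_weight_by_word_py : (List (String × String × Int)) :=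
  [("a", "b", 3), ("b", "c", 5), ("c", "c", -1)]

def Spec_compute_max_edge_weight_by_word_py (edges : List (String × String × Int)) (out : List (String × Int)) : Prop := out = compute_max_edge_weight_by_word_py_alt edges
instance (edges : List (String × String × Int)) (out : List (String × Int)) : Decidable (Spec_compute_max_edge_weight_by_word_py edges out) := by unfold Spec_compute_max_edge_weight_by_word_py; infer_instance

-- ===== CLAIM (what is proved, stated in full; the proofs are below) =====
def Claim_equal_compute_max_edge_weight_by_word_py : Prop := ∀ (edges : List (String × String × Int)), Dom_compute_max_edge_weight_by_word_py edges → Pre_compute_max_edge_weight_by_word_py edges → Spec_compute_max_edge_weight_by_word_py edges (compute_max_edge_weight_by_word_py edges)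

-- ===== LEMMAS AND PROOFS =====

-- reduceD turns B's grouped dict into A's running-max dict, keeping keys and their order.
def reduceD (c : PySem.Dict String (List Int)) : PySem.Dict String Int :=
  PySem.Dict.mk (c.items.map (fun p => (p.1, pvMaxList p.2)))

theorem pvMaxList_append (l : List Int) (x : Int) :
    pvMaxList (l ++ [x]) = if l = [] then x else max (pvMaxList l) x := by
  cases l with
  | nil => simp [pvMaxList]
  | cons h t => simp [pvMaxList, List.foldl_append]

theorem keys_reduceD (c : PySem.Dict String (List Int)) : (reduceD c).keys = c.keys := by
  simp [reduceD, PySem.Dict.keys]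

theorem contains_reduceD (c : PySem.Dict String (List Int)) (k : String) :
    (reduceD c).contains k = c.contains k := by
  simp [PySem.Dict.contains_eq_decide_mem_keys, keys_reduceD]

theorem get?_reduceD (c : PySem.Dict String (List Int)) (k : String) :
    (reduceD c).get? k = (c.get? k).map pvMaxList := by
  obtain ⟨l⟩ := c
  induction l with
  | nil => rfl
  | cons p t ih =>
      show (PySem.Dict.mk ((p.1, pvMaxList p.2) :: t.map (fun p => (p.1, pvMaxList p.2)))).get? k = _
      rw [PySem.Dict.get?_mk_cons, PySem.Dict.get?_mk_cons]
      by_cases h : p.1 == k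
      · simp [h]
      · simp only [h, Bool.false_eq_true, not_false_eq_true, if_neg]
        exact ih

theorem reduceD_insert (c : PySem.Dict String (List Int)) (k : String) (l : List Int) :
    reduceD (c.insert k l) = (reduceD c).insert k (pvMaxList l) := by
  apply PySem.Dict.ext
  by_cases hc : c.contains k = true
  · rw [show (reduceD (c.insert k l)).items
        = (c.insert k l).items.map (fun p => (p.1, pvMaxList p.2)) from rfl,
      PySem.Dict.items_insert_of_contains _ l hc,
      PySem.Dict.items_insert_of_contains _ (pvMaxList l) (by rw [contains_reduceD]; exact hc)]
    rw [show (reduceD c).items = c.items.map (fun p => (p.1, pvMaxList p.2)) from rfl]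
    simp only [List.map_map]
    refine List.map_congr_left ?_
    intro p _
    by_cases h : p.1 = k <;> simp [h]
  · rw [show (reduceD (c.insert k l)).items
        = (c.insert k l).items.map (fun p => (p.1, pvMaxList p.2)) from rfl,
      PySem.Dict.items_insert_of_not_contains _ l (by simpa using hc),
      PySem.Dict.items_insert_of_not_contains _ (pvMaxList l) (by rw [contains_reduceD]; simpa using hc)]
    simp [reduceD]

theorem pvValues_nonempty_insert (c : PySem.Dict String (List Int)) (w : String) (x : Int)
    (hv : ∀ l ∈ c.values, l ≠ []) :
    ∀ l ∈ (c.insert w (c.getD w [] ++ [x])).values, l ≠ [] := by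
  intro l hl
  rcases PySem.Dict.mem_values_insert c w _ l hl with h | h
  · subst h; simp
  · exact hv l h

theorem pvInsert_comm_one (c : PySem.Dict String (List Int)) (w : String) (x : Int)
    (hv : ∀ l ∈ c.values, l ≠ []) :
    (if (reduceD c).contains w then (reduceD c).insert w (max ((reduceD c).getD w 0) x)
     else (reduceD c).insert w x) = reduceD (c.insert w (c.getD w [] ++ [x])) := by
  rw [reduceD_insert, contains_reduceD]
  by_cases hc : c.contains w = true
  · obtain ⟨l, hl⟩ : ∃ l, c.get? w = some l := by
      cases h : c.get? w with
      | none => rw [PySem.Dict.get?_eq_none_iff_contains] at h; rw [hc] at h; cases h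
      | some l => exact ⟨l, rfl⟩
    have hlv : l ∈ c.values := by
      have := PySem.Dict.mem_items_of_get?_eq_some c hl
      simpa [PySem.Dict.values] using List.mem_map_of_mem (f := fun p => p.2) this
    have hlne : l ≠ [] := hv l hlv
    have hgd : c.getD w [] = l := by rw [PySem.Dict.getD_eq_get?_getD, hl]; rfl
    have hgd' : (reduceD c).getD w 0 = pvMaxList l := by
      rw [PySem.Dict.getD_eq_get?_getD, get?_reduceD, hl]; rfl
    rw [if_pos hc, hgd, hgd', pvMaxList_append, if_neg hlne]
  · have hn : c.get? w = none := by
      rw [PySem.Dict.get?_eq_none_iff_contains]; simpa using hc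
    have hgd : c.getD w [] = [] := by rw [PySem.Dict.getD_eq_get?_getD, hn]; rfl
    rw [if_neg hc, hgd]
    simp [pvMaxList]

theorem pvValues_nonempty_step (c : PySem.Dict String (List Int)) (e : String × String × Int)
    (hv : ∀ l ∈ c.values, l ≠ []) : ∀ l ∈ (pvStepB c e).values, l ≠ [] := by
  unfold pvStepB
  exact pvValues_nonempty_insert _ e.2.1 e.2.2 (pvValues_nonempty_insert c e.1 e.2.2 hv)

theorem pvStep_comm (edges : List (String × String × Int)) (e : String × String × Int)
    (c : PySem.Dict String (List Int)) (hv : ∀ l ∈ c.values, l ≠ [])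
    (he : pvLookupA edges e.1 e.2.1 = e.2.2) :
    pvStepA edges (reduceD c) e = reduceD (pvStepB c e) := by
  unfold pvStepA pvStepB
  simp only [he]
  rw [pvInsert_comm_one c e.1 e.2.2 hv]
  exact pvInsert_comm_one _ e.2.1 e.2.2 (pvValues_nonempty_insert c e.1 e.2.2 hv)

theorem pvFold_comm (edges rest : List (String × String × Int))
    (c : PySem.Dict String (List Int)) (hv : ∀ l ∈ c.values, l ≠ [])
    (he : ∀ e ∈ rest, pvLookupA edges e.1 e.2.1 = e.2.2) :
    rest.foldl (pvStepA edges) (reduceD c) = reduceD (rest.foldl pvStepB c) := by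
  induction rest generalizing c with
  | nil => simp
  | cons e t ih =>
      simp only [List.foldl_cons]
      rw [pvStep_comm edges e c hv (he e (by simp))]
      exact ih _ (pvValues_nonempty_step c e hv) (fun x hx => he x (by simp [hx]))

theorem pvLookupA_mem (edges : List (String × String × Int))
    (hnd : (edges.map (fun e => (e.1, e.2.1))).Nodup)
    (e : String × String × Int) (hmem : e ∈ edges) :
    pvLookupA edges e.1 e.2.1 = e.2.2 := by
  unfold pvLookupA
  have hs : (edges.find? (fun p => p.1 == e.1 && p.2.1 == e.2.1)).isSome := by
    rw [List.find?_isSome]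
    exact ⟨e, hmem, by simp⟩
  cases hf : edges.find? (fun p => p.1 == e.1 && p.2.1 == e.2.1) with
  | none => rw [hf] at hs; cases hs
  | some p =>
      have hpred := List.find?_some hf
      have hpm := List.mem_of_find?_eq_some hf
      simp only [Bool.and_eq_true, beq_iff_eq] at hpred
      have : p = e := List.inj_on_of_nodup_map hnd hpm hmem (by simp [hpred.1, hpred.2])
      simp [this]

-- ===== VERDICT (by name: the statement is the Claim_ definition above) =====
theorem compute_max_edge_weight_by_word_py_spec : Claim_equal_compute_max_edge_weight_by_word_py := by
  intro edges _ hpre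
  unfold Spec_compute_max_edge_weight_by_word_py
  unfold compute_max_edge_weight_by_word_py compute_max_edge_weight_by_word_py_alt
  have h0 : (PySem.Dict.empty : PySem.Dict String Int) = reduceD PySem.Dict.empty := rfl
  rw [h0, pvFold_comm edges edges PySem.Dict.empty
    (by intro l hl; simp [PySem.Dict.empty, PySem.Dict.values] at hl)
    (fun e he => pvLookupA_mem edges hpre e he)]
  rfl
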